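-- pv_equiv track=rewrite | github.com/joseslavkis/Teoria-de-Algoritmos | Programación dinámica/ej2.py | find_previous
-- ===== SOURCE A (Python) =====
-- def find_previous(charlas, i):
--     """encuentra el indice de la ultima charla que no se solapa con la charla i"""
--     low, high = 0, i - 1
--     while low <= high:
--         mid = (low + high) // 2
--         if charlas[mid][1] <= charlas[i][0]:
--             if charlas[mid + 1][1] <= charlas[i][0]:
--                 low = mid + 1
--             else:
--                 return mid
--         else:
--             high = mid - 1
--     return -1
-- ===== SOURCE B (Python) =====
-- def find_previous(charlas, i):
--     """encuentra el indice de la ultima charla que no se solapa con la charla i"""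
--     def ok(j):
--         return charlas[j][1] <= charlas[i][0]
--
--     def search(low, high):
--         if low > high:
--             return None
--         mid = low + (high - low) // 2
--         if not ok(mid):
--             return search(low, mid - 1)
--         if ok(mid + 1):
--             return search(mid + 1, high)
--         return mid
--
--     res = search(0, i - 1)
--     return -1 if res is None else res
-- ===== Notes on version B (the rewrite author's own statement) =====
-- stated objective: alternative
-- what changed: A's iterative while-loop binary search with mutable low/high state and an end-of-loop -1 sentinel is re-decomposed into a recursive search(low, high) helper returning None/index with guard-style early returns and a different midpoint expression (low + (high-low)//2), wrapped to map None to -1.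
import Mathlib
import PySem

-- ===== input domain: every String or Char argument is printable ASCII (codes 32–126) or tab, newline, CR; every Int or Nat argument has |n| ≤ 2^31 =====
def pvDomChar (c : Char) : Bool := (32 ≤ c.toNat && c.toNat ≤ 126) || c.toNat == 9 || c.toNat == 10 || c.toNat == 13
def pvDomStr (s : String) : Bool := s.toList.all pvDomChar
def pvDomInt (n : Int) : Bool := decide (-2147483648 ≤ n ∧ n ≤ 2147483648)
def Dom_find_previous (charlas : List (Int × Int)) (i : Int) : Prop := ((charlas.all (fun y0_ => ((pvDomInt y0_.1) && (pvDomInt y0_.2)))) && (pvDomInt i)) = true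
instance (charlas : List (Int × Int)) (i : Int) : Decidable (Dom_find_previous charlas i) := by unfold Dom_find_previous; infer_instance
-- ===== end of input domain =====

-- B replaces A's iterative while-loop binary search by a recursive helper returning Option
-- (None = not found), with guard-style early returns; objective: alternative decomposition, same cost.

-- ===== PORT A =====
-- A's while loop as state-passing recursion over (low, high); indexing via pyGet?
-- (in range on every input Pre_ admits, so the .getD default is never the value used).
def fpLoop (charlas : List (Int × Int)) (i low high : Int) : Int :=
  if h : low ≤ high then
    let mid := PySem.Int.floordiv (low + high) 2
    if ((PySem.List.pyGet? charlas mid).getD (0,0)).2 ≤ ((PySem.List.pyGet? charlas i).getD (0,0)).1 then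
      if ((PySem.List.pyGet? charlas (mid + 1)).getD (0,0)).2 ≤ ((PySem.List.pyGet? charlas i).getD (0,0)).1 then
        fpLoop charlas i (mid + 1) high
      else mid
    else fpLoop charlas i low (mid - 1)
  else -1
termination_by (high - low + 1).toNat
decreasing_by
  · have := PySem.Int.floordiv_two_mid_bounds h; omega
  · have := PySem.Int.floordiv_two_mid_bounds h; omega

def find_previous (charlas : List (Int × Int)) (i : Int) : Int :=
  fpLoop charlas i 0 (i - 1)

-- ===== PORT B =====
def fpOk (charlas : List (Int × Int)) (i j : Int) : Bool :=
  ((PySem.List.pyGet? charlas j).getD (0,0)).2 ≤ ((PySem.List.pyGet? charlas i).getD (0,0)).1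

def fpSearch (charlas : List (Int × Int)) (i low high : Int) : Option Int :=
  if h : low > high then none
  else
    let mid := low + PySem.Int.floordiv (high - low) 2
    if !(fpOk charlas i mid) then fpSearch charlas i low (mid - 1)
    else if fpOk charlas i (mid + 1) then fpSearch charlas i (mid + 1) high
    else some mid
termination_by (high - low + 1).toNat
decreasing_by
  · have := PySem.Int.floordiv_two_mid_bounds (lo := 0) (hi := high - low) (by omega)
    rw [zero_add] at this; omega
  · have := PySem.Int.floordiv_two_mid_bounds (lo := 0) (hi := high - low) (by omega)
    rw [zero_add] at this; omega

def find_previous_alt (charlas : List (Int × Int)) (i : Int) : Int :=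
  match fpSearch charlas i 0 (i - 1) with
  | none => -1
  | some r => r

-- ===== PRECONDITION & SPEC =====
-- Pre_ excludes exactly the inputs where Python A raises IndexError: i ≥ 1 and i ≥ len(charlas)
-- (there the loop body evaluates charlas[i] (or charlas[mid]) out of range); for i ≤ 0 the loop
-- never runs and A returns -1 even on the empty list.
def Pre_find_previous (charlas : List (Int × Int)) (i : Int) : Prop :=
  i ≤ 0 ∨ i < (charlas.length : Int)
instance (charlas : List (Int × Int)) (i : Int) : Decidable (Pre_find_previous charlas i) := by
  unfold Pre_find_previous; infer_instance

def pvWitness_find_previous : (List (Int × Int)) × Int := ([(1, 2), (3, 4)], 1)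

def Spec_find_previous (charlas : List (Int × Int)) (i : Int) (out : Int) : Prop := out = find_previous_alt charlas i
instance (charlas : List (Int × Int)) (i : Int) (out : Int) : Decidable (Spec_find_previous charlas i out) := by unfold Spec_find_previous; infer_instance

-- ===== CLAIM (what is proved, stated in full; the proofs are below) =====
def Claim_equal_find_previous : Prop := ∀ (charlas : List (Int × Int)) (i : Int), Dom_find_previous charlas i → Pre_find_previous charlas i → Spec_find_previous charlas i (find_previous charlas i)

-- ===== LEMMAS AND PROOFS =====

-- the two midpoint expressions coincide
lemma fp_mid_eq (low high : Int) :
    PySem.Int.floordiv (low + high) 2 = low + PySem.Int.floordiv (high - low) 2 := by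
  rw [PySem.Int.floordiv_eq_ediv_of_pos (by omega : (0:Int) < 2), PySem.Int.floordiv_eq_ediv_of_pos (by omega : (0:Int) < 2)]
  omega

lemma fpLoop_eq_fpSearch (charlas : List (Int × Int)) (i : Int) :
    ∀ (n : Nat) (low high : Int), (high - low + 1).toNat ≤ n →
      fpLoop charlas i low high =
        (match fpSearch charlas i low high with | none => -1 | some r => r) := by
  intro n
  induction n with
  | zero =>
      intro low high hn
      rw [fpLoop, fpSearch]
      have hlt : low > high := by omega
      simp [hlt]
  | succ n ih =>
      intro low high hn
      rw [fpLoop, fpSearch]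
      by_cases hle : low ≤ high
      · have hgt : ¬ low > high := by omega
        simp only [hle, hgt, dif_pos, dif_neg, not_false_iff]
        rw [← fp_mid_eq low high]
        have hmid := PySem.Int.floordiv_two_mid_bounds hle
        set mid := PySem.Int.floordiv (low + high) 2 with hm
        by_cases h1 : ((PySem.List.pyGet? charlas mid).getD (0,0)).2 ≤ ((PySem.List.pyGet? charlas i).getD (0,0)).1
        · by_cases h2 : ((PySem.List.pyGet? charlas (mid + 1)).getD (0,0)).2 ≤ ((PySem.List.pyGet? charlas i).getD (0,0)).1
          · simp only [fpOk, h1, h2, decide_true, Bool.not_true, if_true, if_false,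
              Bool.false_eq_true]
            exact ih (mid + 1) high (by omega)
          · simp [fpOk, h1, h2]
        · simp only [fpOk, h1, decide_false, Bool.not_false, if_true]
          exact ih low (mid - 1) (by omega)
      · have hgt : low > high := by omega
        simp [hle, hgt]

theorem find_previous_spec : Claim_equal_find_previous := by
  intro charlas i _ _
  unfold Spec_find_previous find_previous find_previous_alt
  exact fpLoop_eq_fpSearch charlas i (i - 1 - 0 + 1).toNat 0 (i - 1) (le_refl _)
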